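-- pv_equiv track=rewrite | github.com/maumemoli/blue_steel | releases/maya/BlueSteel/scripts/blue_steel/logic/utilities.py | find_split_suffix
-- ===== SOURCE A (Python) =====
-- def find_split_suffix(primary_name: str):
--     """Find the split suffix for a primary shape name.
--     The suffix is all capital letters at the end of the name.
--
--     Parameters:
--         primary_name (str): The primary shape name.
--     Returns:
--         str: The split suffix.
--     """
--     suffix = ""
--     for char in primary_name[::-1]:
--         if char.isupper():
--             suffix = char + suffix
--         else:
--             break
--     return suffix
-- ===== SOURCE B (Python) =====
-- def find_split_suffix(primary_name: str):
--     """Find the split suffix (trailing uppercase run) of a primary shape name."""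
--     start = 0
--     for i, ch in enumerate(primary_name):
--         if not ch.isupper():
--             start = i + 1
--     return primary_name[start:]
-- ===== Notes on version B (the rewrite author's own statement) =====
-- stated objective: alternative
-- what changed: B replaces A's backward char-by-char suffix building (reversed iteration with break) by a single forward pass that tracks the start index of the current uppercase run and slices once.
import Mathlib
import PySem

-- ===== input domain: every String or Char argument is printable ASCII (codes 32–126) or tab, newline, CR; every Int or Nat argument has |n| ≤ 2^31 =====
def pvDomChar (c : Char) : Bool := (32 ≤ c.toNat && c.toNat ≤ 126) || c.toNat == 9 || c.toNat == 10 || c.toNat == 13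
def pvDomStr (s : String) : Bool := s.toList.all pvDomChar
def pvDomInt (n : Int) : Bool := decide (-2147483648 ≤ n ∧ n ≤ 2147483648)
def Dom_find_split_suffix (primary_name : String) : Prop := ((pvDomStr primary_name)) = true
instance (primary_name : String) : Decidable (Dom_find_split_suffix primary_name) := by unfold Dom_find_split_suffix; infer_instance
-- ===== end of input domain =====

-- B replaces A's backward char-by-char suffix building by a single forward pass that
-- tracks the start of the current uppercase run and slices once (alternative decomposition).

-- ===== PORT A =====
-- A iterates primary_name[::-1] (= reverse; PySem.List.slice?_none_none_neg_one) and
-- prepends each uppercase char to the suffix until a non-uppercase char breaks the loop.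
def pvALoop : List Char → List Char → List Char
  | [], suffix => suffix
  | c :: rest, suffix =>
      if PySem.Chars.isupper c then pvALoop rest (c :: suffix) else suffix

def find_split_suffix (primary_name : String) : String :=
  String.ofList (pvALoop primary_name.toList.reverse [])

-- ===== PORT B =====
-- B: one forward pass over enumerate(primary_name) tracking the start index of the
-- current uppercase run, then one slice primary_name[start:].
def find_split_suffix_alt (primary_name : String) : String :=
  let cs := primary_name.toList
  let start : Int :=
    (PySem.List.enumerate cs 0).foldl
      (fun start p => if !(PySem.Chars.isupper p.2) then p.1 + 1 else start) 0
  String.ofList (PySem.List.slice cs (some start) none)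

-- ===== PRECONDITION & SPEC =====
def Spec_find_split_suffix (primary_name : String) (out : String) : Prop := out = find_split_suffix_alt primary_name
instance (primary_name : String) (out : String) : Decidable (Spec_find_split_suffix primary_name out) := by unfold Spec_find_split_suffix; infer_instance

-- ===== CLAIM (what is proved, stated in full; the proofs are below) =====
def Claim_equal_find_split_suffix : Prop := ∀ (primary_name : String), Dom_find_split_suffix primary_name → Spec_find_split_suffix primary_name (find_split_suffix primary_name)

-- ===== LEMMAS AND PROOFS =====

-- A's loop accumulates the reversed leading uppercase run of its (already reversed) input.
theorem pvALoop_eq (cs acc : List Char) :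
    pvALoop cs acc = (cs.takeWhile PySem.Chars.isupper).reverse ++ acc := by
  induction cs generalizing acc with
  | nil => simp [pvALoop]
  | cons c rest ih =>
      by_cases h : PySem.Chars.isupper c <;>
        simp [pvALoop, h, ih]

-- length of the trailing uppercase run
def pvTrail (cs : List Char) : Nat :=
  (cs.reverse.takeWhile PySem.Chars.isupper).length

theorem pvTrail_le (cs : List Char) : pvTrail cs ≤ cs.length := by
  simpa [pvTrail] using
    (List.takeWhile_sublist (p := PySem.Chars.isupper) (l := cs.reverse)).length_le

theorem pvTrail_all (cs : List Char) (h : cs.all PySem.Chars.isupper) :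
    cs.reverse.takeWhile PySem.Chars.isupper = cs.reverse := by
  refine List.takeWhile_eq_self_iff.mpr ?_
  intro x hx
  exact (List.all_eq_true.mp h) x (List.mem_reverse.mp hx)

theorem pvTrail_not_all (cs : List Char) (h : ¬ cs.all PySem.Chars.isupper) :
    pvTrail cs ≠ cs.length := by
  intro he
  apply h
  have hlen : (cs.reverse.takeWhile PySem.Chars.isupper).length = cs.reverse.length := by
    simpa [pvTrail] using he
  have heq := (List.takeWhile_sublist (p := PySem.Chars.isupper)
      (l := cs.reverse)).eq_of_length hlen
  refine List.all_eq_true.mpr fun x hx => ?_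
  exact List.takeWhile_eq_self_iff.mp heq x (List.mem_reverse.mpr hx)

theorem pvTrail_cons (c : Char) (rest : List Char) :
    pvTrail (c :: rest)
      = if rest.all PySem.Chars.isupper
        then rest.length + (if PySem.Chars.isupper c then 1 else 0)
        else pvTrail rest := by
  unfold pvTrail
  rw [List.reverse_cons, List.takeWhile_append]
  by_cases hall : rest.all PySem.Chars.isupper
  · rw [pvTrail_all rest hall]
    by_cases hc : PySem.Chars.isupper c <;> simp [hall, hc]
  · have hne : pvTrail rest ≠ rest.length := pvTrail_not_all rest hall
    simp only [pvTrail] at hne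
    simp [hall, hne]

-- B's fold computes the start index of the trailing uppercase run.
theorem pvBFold_eq (cs : List Char) (k s : Int) :
    (PySem.List.enumerate cs k).foldl
      (fun start p => if !(PySem.Chars.isupper p.2) then p.1 + 1 else start) s
    = if cs.all PySem.Chars.isupper then s
      else k + ((cs.length : Int) - (pvTrail cs : Int)) := by
  induction cs generalizing k s with
  | nil => simp [PySem.List.enumerate_nil]
  | cons c rest ih =>
      rw [PySem.List.enumerate_cons, List.foldl_cons, ih]
      have hle := pvTrail_le rest
      by_cases hall : rest.all PySem.Chars.isupper
      · by_cases hc : PySem.Chars.isupper c <;> simp [hall, hc, pvTrail_cons]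
      · have hne : pvTrail rest ≠ rest.length := pvTrail_not_all rest hall
        have hcc : ¬ (c :: rest).all PySem.Chars.isupper := by
          simp [List.all_cons, hall]
        simp only [hcc, pvTrail_cons, hall]
        simp
        push_cast
        omega

-- drop at (length - trailing-run length) is the trailing uppercase run
theorem pvDrop_eq (cs : List Char) :
    cs.drop (cs.length - pvTrail cs)
      = (cs.reverse.takeWhile PySem.Chars.isupper).reverse := by
  have h : (cs.reverse.dropWhile PySem.Chars.isupper).reverse
        ++ (cs.reverse.takeWhile PySem.Chars.isupper).reverse = cs := by
    rw [← List.reverse_append, List.takeWhile_append_dropWhile, List.reverse_reverse]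
  have hl : (cs.reverse.dropWhile PySem.Chars.isupper).reverse.length
        = cs.length - pvTrail cs := by
    have := congrArg List.length h
    simp at this
    simp only [List.length_reverse, pvTrail]
    omega
  have key := List.drop_left
    (l₁ := (cs.reverse.dropWhile PySem.Chars.isupper).reverse)
    (l₂ := (cs.reverse.takeWhile PySem.Chars.isupper).reverse)
  rw [h, hl] at key
  exact key

theorem find_split_suffix_eq (s : String) :
    find_split_suffix s = find_split_suffix_alt s := by
  have halt : find_split_suffix_alt s = String.ofList (PySem.List.slice s.toList
      (some ((PySem.List.enumerate s.toList 0).foldl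
        (fun start p => if !(PySem.Chars.isupper p.2) then p.1 + 1 else start) 0)) none) := rfl
  unfold find_split_suffix
  rw [halt, pvALoop_eq, List.append_nil, pvBFold_eq]
  by_cases hall : s.toList.all PySem.Chars.isupper
  · rw [if_pos hall, pvTrail_all _ hall]
    have h0 : PySem.List.slice s.toList (some ((0 : Nat) : Int)) none = s.toList.drop 0 :=
      PySem.List.slice_from_natCast ..
    simp only [Nat.cast_zero] at h0
    rw [h0, List.drop_zero, List.reverse_reverse]
  · rw [if_neg hall]
    have hle := pvTrail_le s.toList
    have hcast : (0 : Int) + ((s.toList.length : Int) - (pvTrail s.toList : Int))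
        = ((s.toList.length - pvTrail s.toList : Nat) : Int) := by push_cast; omega
    rw [hcast, PySem.List.slice_from_natCast, pvDrop_eq]
-- ===== VERDICT (by name: the statement is the Claim_ definition above) =====
theorem find_split_suffix_spec : Claim_equal_find_split_suffix := by
  intro s _
  unfold Spec_find_split_suffix
  exact find_split_suffix_eq s
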